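-- pv_equiv track=rewrite | github.com/5cos5/AOC-2024 | Day 9/day9_part2.py | find_empty_space
-- ===== SOURCE A (Python) =====
-- def find_empty_space(disk):
--     count = 0
--     empty_space_dict = {}
--     for num_idx, num in enumerate(disk):
--         if num == '.':
--             count += 1
--         elif num != '.' and count !=0:
--             if count not in empty_space_dict.values(): #only save values which are unique to optimise
--                 empty_space_dict[num_idx-count] = count
--             count = 0
--         if len(empty_space_dict.keys()) == 9: #found all possible lengths,added to optimise
--             return empty_space_dict
--     return empty_space_dict
-- ===== SOURCE B (Python) =====
-- def find_empty_space(disk):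
--     # Two-phase: segment the disk into maximal runs first, then record the
--     # first gap (dot-run) of each distinct length, ignoring the trailing run.
--     runs = []
--     for idx, ch in enumerate(disk):
--         dot = ch == '.'
--         if runs and runs[-1][0] == dot:
--             runs[-1][2] += 1
--         else:
--             runs.append([dot, idx, 1])
--     result = {}
--     for dot, start, length in runs[:-1]:
--         if dot and length not in result.values():
--             result[start] = length
--             if len(result) == 9:
--                 return result
--     return result
-- ===== Notes on version B (the rewrite author's own statement) =====
-- stated objective: alternative
-- what changed: Replaced A's per-character state machine (counter flushed on each non-dot char) with a two-phase pass: first segment the disk into maximal runs, then walk the runs (excluding the trailing one) recording the first gap of each distinct length, stopping at 9 entries.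
import Mathlib
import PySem

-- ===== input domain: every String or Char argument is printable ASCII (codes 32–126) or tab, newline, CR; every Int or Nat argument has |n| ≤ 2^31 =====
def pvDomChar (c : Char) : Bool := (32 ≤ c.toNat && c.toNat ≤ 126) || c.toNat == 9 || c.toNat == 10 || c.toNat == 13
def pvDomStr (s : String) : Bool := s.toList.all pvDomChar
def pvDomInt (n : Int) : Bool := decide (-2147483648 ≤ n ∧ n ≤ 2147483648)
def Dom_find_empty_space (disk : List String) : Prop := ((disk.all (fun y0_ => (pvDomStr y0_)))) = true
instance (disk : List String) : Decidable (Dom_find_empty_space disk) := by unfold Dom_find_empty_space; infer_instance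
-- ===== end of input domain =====

-- B replaces A's per-character counter state machine with a two-phase pass
-- (segment into maximal runs, then record gaps), an alternative decomposition.

-- ===== PORT A =====
-- loop 'for num_idx, num in enumerate(disk)' as recursion over PySem.List.enumerate,
-- with state (count, empty_space_dict); the early 'return' is the non-recursive branch.
def pvGoA (l : List (Int × String)) (count : Int) (d : PySem.Dict Int Int) : PySem.Dict Int Int :=
  match l with
  | [] => d
  | (num_idx, num) :: rest =>
    let st :=
      if num == "." then (count + 1, d)
      else if num != "." && count != 0 then
        let d := if !((PySem.Dict.values d).contains count)
                 then PySem.Dict.insert d (num_idx - count) count else d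
        ((0 : Int), d)
      else (count, d)
    if (PySem.Dict.keys st.2).length == 9 then st.2 else pvGoA rest st.1 st.2

def find_empty_space (disk : List String) : List (Int × Int) :=
  (pvGoA (PySem.List.enumerate disk) 0 PySem.Dict.empty).items

-- ===== PORT B =====
-- runs list kept REVERSED (head = Python's runs[-1]), reversed at the end:
-- exact transcription of 'runs.append(...)' / 'runs[-1][2] += 1'.
def pvRunsB (l : List (Int × String)) (runs : List (Bool × Int × Int)) : List (Bool × Int × Int) :=
  match l with
  | [] => runs.reverse
  | (idx, ch) :: rest =>
    let dot := ch == "."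
    match runs with
    | (d, s, c) :: rs =>
      if d == dot then pvRunsB rest ((d, s, c + 1) :: rs)
      else pvRunsB rest ((dot, idx, 1) :: (d, s, c) :: rs)
    | [] => pvRunsB rest [(dot, idx, 1)]

def pvProcB (runs : List (Bool × Int × Int)) (result : PySem.Dict Int Int) : PySem.Dict Int Int :=
  match runs with
  | [] => result
  | (dot, start, length) :: rest =>
    if dot && !((PySem.Dict.values result).contains length) then
      let result := PySem.Dict.insert result start length
      if PySem.Dict.size result == 9 then result
      else pvProcB rest result
    else pvProcB rest result

def find_empty_space_alt (disk : List String) : List (Int × Int) :=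
  let runs := pvRunsB (PySem.List.enumerate disk) []
  -- runs[:-1] is PySem.List.slice runs none (some (-1))
  (pvProcB (PySem.List.slice runs none (some (-1))) PySem.Dict.empty).items

-- ===== PRECONDITION & SPEC =====
def Spec_find_empty_space (disk : List String) (out : List (Int × Int)) : Prop := out = find_empty_space_alt disk
instance (disk : List String) (out : List (Int × Int)) : Decidable (Spec_find_empty_space disk out) := by unfold Spec_find_empty_space; infer_instance

-- ===== CLAIM (what is proved, stated in full; the proofs are below) =====
def Claim_equal_find_empty_space : Prop := ∀ (disk : List String), Dom_find_empty_space disk → Spec_find_empty_space disk (find_empty_space disk)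

-- ===== LEMMAS AND PROOFS =====

-- runs of l, starting at index i, by structural (right) recursion: proof-side
-- reference form of B's run builder.
def pvRunsR : List String → Int → List (Bool × Int × Int)
  | [], _ => []
  | ch :: r, i =>
    let dot := ch == "."
    match pvRunsR r (i + 1) with
    | (d, s, c) :: rs => if d == dot then (dot, i, c + 1) :: rs else (dot, i, 1) :: (d, s, c) :: rs
    | [] => [(dot, i, 1)]

-- prepend a pending run (flag d, start s, length c) onto a run list, merging with
-- the head if it carries the same flag
def pvMerge (d : Bool) (s c : Int) : List (Bool × Int × Int) → List (Bool × Int × Int)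
  | (d2, s2, c2) :: rs => if d2 == d then (d, s, c + c2) :: rs else (d, s, c) :: (d2, s2, c2) :: rs
  | [] => [(d, s, c)]

lemma pvRunsR_cons (ch : String) (r : List String) (i : Int) :
    pvRunsR (ch :: r) i = pvMerge (ch == ".") i 1 (pvRunsR r (i + 1)) := by
  simp only [pvRunsR, pvMerge]
  cases h : pvRunsR r (i + 1) with
  | nil => rfl
  | cons p rs =>
    obtain ⟨d2, s2, c2⟩ := p
    by_cases hd : d2 = (ch == ".") <;> simp [hd, Int.add_comm]

lemma pvRunsB_acc (l : List String) :
    ∀ (i : Int) (d : Bool) (s c : Int) (acc : List (Bool × Int × Int)),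
    pvRunsB (PySem.List.enumerate l i) ((d, s, c) :: acc)
      = acc.reverse ++ pvMerge d s c (pvRunsR l i) := by
  induction l with
  | nil => intro i d s c acc; simp [pvRunsB, pvMerge, PySem.List.enumerate, pvRunsR]
  | cons ch r ih =>
    intro i d s c acc
    rw [PySem.List.enumerate_cons]
    simp only [pvRunsB]
    rw [pvRunsR_cons]
    by_cases hd : d = (ch == ".")
    · simp only [hd, beq_self_eq_true, if_true]
      rw [ih]
      cases h : pvRunsR r (i + 1) with
      | nil => simp [pvMerge]
      | cons p rs =>
        obtain ⟨d2, s2, c2⟩ := p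
        by_cases h2 : d2 = (ch == ".") <;> simp [pvMerge, h2] <;> try omega
    · rw [if_neg (by simpa using hd)]
      rw [ih]
      simp only [List.reverse_cons, List.append_assoc]
      congr 1
      cases h : pvRunsR r (i + 1) with
      | nil => simp [pvMerge, Ne.symm hd]
      | cons p rs =>
        obtain ⟨d2, s2, c2⟩ := p
        by_cases h2 : d2 = (ch == ".") <;>
          simp [pvMerge, h2, Ne.symm hd]

lemma pvRunsB_eq_pvRunsR (l : List String) (i : Int) :
    pvRunsB (PySem.List.enumerate l i) [] = pvRunsR l i := by
  cases l with
  | nil => simp [pvRunsB, PySem.List.enumerate, pvRunsR]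
  | cons ch r =>
    rw [PySem.List.enumerate_cons]
    simp only [pvRunsB]
    rw [pvRunsB_acc, pvRunsR_cons]
    simp

lemma pvRunsR_ne_nil (ch : String) (r : List String) (i : Int) :
    pvRunsR (ch :: r) i ≠ [] := by
  rw [pvRunsR_cons]
  cases h : pvRunsR r (i + 1) with
  | nil => simp [pvMerge]
  | cons p rs =>
    obtain ⟨d2, s2, c2⟩ := p
    by_cases h2 : d2 = (ch == ".") <;> simp [pvMerge, h2]

-- a leading non-dot run is skipped by pvProcB (after dropping the trailing run)
lemma pvProcB_skip (ch : String) (hch : (ch == ".") = false) (r : List String) (i : Int)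
    (d : PySem.Dict Int Int) :
    pvProcB (pvRunsR (ch :: r) i).dropLast d = pvProcB (pvRunsR r (i + 1)).dropLast d := by
  rw [pvRunsR_cons, hch]
  cases h : pvRunsR r (i + 1) with
  | nil => simp [pvMerge, pvProcB]
  | cons p rs =>
    obtain ⟨d2, s2, c2⟩ := p
    cases d2
    · simp only [pvMerge, beq_self_eq_true, if_true]
      cases rs with
      | nil => simp [pvProcB]
      | cons q qs => simp [List.dropLast_cons₂, pvProcB]
    · simp only [pvMerge]
      rw [if_neg (by simp)]
      simp [List.dropLast_cons₂, pvProcB]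

-- pending-dot-run adjustment: after seeing c dots ending just before index i,
-- the remaining runs are pvPref c i (runs of the rest)
def pvPref (c i : Int) (runs : List (Bool × Int × Int)) : List (Bool × Int × Int) :=
  if c = 0 then runs
  else
    match runs with
    | (true, _, ln) :: rs => (true, i - c, ln + c) :: rs
    | rs => (true, i - c, c) :: rs

-- the pvPref invariant advances correctly over a dot character
lemma pvPref_dot (ch : String) (hch : (ch == ".") = true) (r : List String) (i c : Int)
    (hc : 0 ≤ c) :
    pvPref (c + 1) (i + 1) (pvRunsR r (i + 1)) = pvPref c i (pvRunsR (ch :: r) i) := by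
  rw [pvRunsR_cons, hch]
  have hc1 : ¬(c + 1 = 0) := by omega
  cases h : pvRunsR r (i + 1) with
  | nil =>
    by_cases h0 : c = 0 <;> simp [pvMerge, pvPref, h0, hc1] <;> omega
  | cons p rs =>
    obtain ⟨d2, s2, c2⟩ := p
    cases d2
    · by_cases h0 : c = 0 <;> simp [pvMerge, pvPref, h0, hc1] <;> omega
    · by_cases h0 : c = 0 <;> simp [pvMerge, pvPref, h0, hc1] <;> omega

-- the head of the runs of a list starting with a non-dot character is a non-dot run
lemma pvRunsR_head_false (ch : String) (hch : (ch == ".") = false) (r : List String) (i : Int) :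
    ∃ s c rs, pvRunsR (ch :: r) i = (false, s, c) :: rs := by
  rw [pvRunsR_cons]
  cases h : pvRunsR r (i + 1) with
  | nil => exact ⟨i, 1, [], by simp [pvMerge, hch]⟩
  | cons p rs =>
    obtain ⟨d2, s2, c2⟩ := p
    cases d2
    · exact ⟨i, 1 + c2, rs, by simp [pvMerge, hch]⟩
    · exact ⟨i, 1, (true, s2, c2) :: rs, by simp [pvMerge, hch]⟩

-- MAIN LEMMA: A's state machine, entered with pending dot-count c at index i and
-- dict d (not yet full), computes pvProcB of the adjusted run list.
lemma pvGoA_eq_pvProcB (l : List String) :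
    ∀ (i c : Int) (d : PySem.Dict Int Int), 0 ≤ c →
    (PySem.Dict.keys d).length ≠ 9 →
    pvGoA (PySem.List.enumerate l i) c d = pvProcB (pvPref c i (pvRunsR l i)).dropLast d := by
  induction l with
  | nil =>
    intro i c d _ _
    simp only [PySem.List.enumerate_nil, pvGoA, pvRunsR, pvPref]
    by_cases h0 : c = 0 <;> simp [h0, pvProcB]
  | cons ch r ih =>
    intro i c d hc hd9
    have hd9' : ((PySem.Dict.keys d).length == 9) = false := by simpa using hd9
    rw [PySem.List.enumerate_cons]
    by_cases hch : (ch == ".") = true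
    · -- dot character: count += 1, dict unchanged
      simp [pvGoA, hch, hd9']
      rw [ih (i + 1) (c + 1) d (by omega) hd9, pvPref_dot ch hch r i c hc]
    · -- non-dot character
      have hch' : (ch == ".") = false := by simpa using hch
      by_cases h0 : c = 0
      · -- count = 0: nothing happens on either side
        subst h0
        simp [pvGoA, hch', hd9']
        rw [ih (i + 1) 0 d le_rfl hd9]
        simp only [pvPref, if_true]
        exact (pvProcB_skip ch hch' r i d).symm
      · -- count = c > 0: flush the gap
        have hchne : ch ≠ "." := by intro h; simp [h] at hch'
        have hcond : (ch != "." && (c != 0)) = true := by simp [hchne, h0]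
        have hpref : pvPref c i (pvRunsR (ch :: r) i)
            = (true, i - c, c) :: pvRunsR (ch :: r) i := by
          obtain ⟨s2, c2, rs, hR⟩ := pvRunsR_head_false ch hch' r i
          rw [hR]; simp [pvPref, h0]
        rw [hpref, List.dropLast_cons_of_ne_nil (pvRunsR_ne_nil ch r i)]
        by_cases hv : (PySem.Dict.values d).contains c = true
        · -- length already recorded: both sides skip
          have hvm : c ∈ PySem.Dict.values d := by simpa using hv
          simp [pvGoA, pvProcB, hch', hcond, hvm, hd9]
          rw [ih (i + 1) 0 d le_rfl hd9]
          simp only [pvPref, if_true]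
          exact (pvProcB_skip ch hch' r i d).symm
        · -- record the gap at key i - c
          have hvm' : c ∉ PySem.Dict.values d := by simpa using hv
          by_cases h9 : (PySem.Dict.keys (PySem.Dict.insert d (i - c) c)).length = 9
          · have hit : (PySem.Dict.insert d (i - c) c).items.length = 9 := by
              simpa [PySem.Dict.keys] using h9
            simp [pvGoA, pvProcB, hch', hcond, hvm', PySem.Dict.size, PySem.Dict.keys, hit]
          · have hit : ¬(PySem.Dict.insert d (i - c) c).items.length = 9 := by
              simpa [PySem.Dict.keys] using h9
            simp [pvGoA, pvProcB, hch', hcond, hvm', PySem.Dict.size, PySem.Dict.keys, hit]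
            rw [ih (i + 1) 0 _ le_rfl h9]
            simp only [pvPref, if_true]
            exact (pvProcB_skip ch hch' r i _).symm

-- ===== VERDICT (by name: the statement is the Claim_ definition above) =====
theorem find_empty_space_spec : Claim_equal_find_empty_space := by
  intro disk _
  unfold Spec_find_empty_space find_empty_space find_empty_space_alt
  rw [pvRunsB_eq_pvRunsR disk 0]
  show _ = (pvProcB (PySem.List.slice (pvRunsR disk 0) none (some (-1))) PySem.Dict.empty).items
  rw [PySem.List.slice_to_neg_one]
  rw [pvGoA_eq_pvProcB disk 0 0 PySem.Dict.empty le_rfl (by simp [PySem.Dict.keys_empty])]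
  simp [pvPref]
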